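-- pv_equiv track=rewrite | github.com/RaghavendraRQ/PQC | core/utils/slh/arithm.py | gen_len
-- ===== SOURCE A (Python) =====
-- def gen_len(security_parameter, bits_per_hash):
--     w = 2 ** bits_per_hash
--     length_1 = (8 * security_parameter + bits_per_hash - 1) // bits_per_hash
--     max_check_sum = length_1 * (w - 1)
--
--     length_2 = 1
--     capacity = w
--     while capacity <= max_check_sum:
--         length_2 += 1
--         capacity *= w
--
--     return length_2
-- ===== SOURCE B (Python) =====
-- def gen_len(security_parameter, bits_per_hash):
--     length_1 = (8 * security_parameter + bits_per_hash - 1) // bits_per_hash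
--     max_check_sum = length_1 * ((1 << bits_per_hash) - 1)
--     if max_check_sum <= 0:
--         return 1
--     return (max_check_sum.bit_length() - 1) // bits_per_hash + 1
-- ===== Notes on version B (the rewrite author's own statement) =====
-- stated objective: faster
-- what changed: The multiply-up while loop counting base-w digits of the checksum is replaced by an O(1) closed form using bit_length (w is a power of two, so length_2 = (max_check_sum.bit_length()-1)//bits_per_hash + 1 when the checksum is positive, else 1).
-- outside the precondition, e.g. on gen_len(-5, -3): A returns 1, B raises ValueError
import Mathlib
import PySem

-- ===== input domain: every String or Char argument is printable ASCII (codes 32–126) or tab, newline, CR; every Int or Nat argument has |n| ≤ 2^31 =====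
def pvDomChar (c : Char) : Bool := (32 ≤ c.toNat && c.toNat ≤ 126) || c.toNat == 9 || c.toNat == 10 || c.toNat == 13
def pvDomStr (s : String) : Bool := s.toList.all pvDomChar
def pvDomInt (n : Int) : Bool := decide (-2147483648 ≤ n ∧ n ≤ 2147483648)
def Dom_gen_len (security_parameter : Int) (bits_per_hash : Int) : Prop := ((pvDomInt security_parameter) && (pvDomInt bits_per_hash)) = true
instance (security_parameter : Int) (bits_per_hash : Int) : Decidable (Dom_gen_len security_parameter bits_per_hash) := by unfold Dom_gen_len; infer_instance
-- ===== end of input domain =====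

-- B replaces A's multiply-up digit-counting loop by a closed form via the bit length
-- (w = 2^bits_per_hash is a power of two); objective: faster (O(1) arithmetic instead of O(length_2) bignum multiplications).

-- ===== PORT A =====
-- A's while loop: length_2 = 1, capacity = w; while capacity ≤ max_check_sum: length_2 += 1, capacity *= w.
-- The extra conjuncts 2 ≤ w and 1 ≤ capacity are totality guards only; inside Pre_ they always hold.
def gen_lenLoop (m w capacity : Nat) (len : Int) : Int :=
  if h : capacity ≤ m ∧ 2 ≤ w ∧ 1 ≤ capacity then
    gen_lenLoop m w (capacity * w) (len + 1)
  else len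
termination_by m + 1 - capacity
decreasing_by
  obtain ⟨h1, h2, h3⟩ := h
  have : capacity + 1 ≤ capacity * w := by nlinarith
  omega

def gen_len (security_parameter : Int) (bits_per_hash : Int) : Int :=
  let w : Int := 2 ^ bits_per_hash.toNat
  let length_1 : Int := PySem.Int.floordiv (8 * security_parameter + bits_per_hash - 1) bits_per_hash
  let max_check_sum : Int := length_1 * (w - 1)
  gen_lenLoop max_check_sum.toNat w.toNat w.toNat 1

-- ===== PORT B =====
-- Python's int.bit_length for nonnegative n, as the corresponding library function Nat.log2.
def bitLen (n : Nat) : Nat :=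
  if n = 0 then 0 else Nat.log2 n + 1

def gen_len_alt (security_parameter : Int) (bits_per_hash : Int) : Int :=
  let length_1 : Int := PySem.Int.floordiv (8 * security_parameter + bits_per_hash - 1) bits_per_hash
  let max_check_sum : Int := length_1 * (2 ^ bits_per_hash.toNat - 1)
  if max_check_sum ≤ 0 then 1
  else ((bitLen max_check_sum.toNat - 1) / bits_per_hash.toNat : Nat) + 1

-- ===== PRECONDITION & SPEC =====
-- Pre_ excludes bits_per_hash = 0 (A raises ZeroDivisionError) and bits_per_hash < 0,
-- where Python's 2 ** bits_per_hash is a float: A then either diverges or returns via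
-- float arithmetic, and B itself raises ValueError (negative shift count).
def Pre_gen_len (security_parameter : Int) (bits_per_hash : Int) : Prop :=
  1 ≤ bits_per_hash
instance (security_parameter : Int) (bits_per_hash : Int) : Decidable (Pre_gen_len security_parameter bits_per_hash) := by unfold Pre_gen_len; infer_instance

def pvWitness_gen_len : Int × Int := (16, 4)

def Spec_gen_len (security_parameter : Int) (bits_per_hash : Int) (out : Int) : Prop := out = gen_len_alt security_parameter bits_per_hash
instance (security_parameter : Int) (bits_per_hash : Int) (out : Int) : Decidable (Spec_gen_len security_parameter bits_per_hash out) := by unfold Spec_gen_len; infer_instance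

-- ===== CLAIM (what is proved, stated in full; the proofs are below) =====
def Claim_equal_gen_len : Prop := ∀ (security_parameter : Int) (bits_per_hash : Int), Dom_gen_len security_parameter bits_per_hash → Pre_gen_len security_parameter bits_per_hash → Spec_gen_len security_parameter bits_per_hash (gen_len security_parameter bits_per_hash)

-- ===== LEMMAS AND PROOFS =====

lemma bitLen_eq_log2_succ (n : Nat) (hn : n ≠ 0) : bitLen n = Nat.log 2 n + 1 := by
  rw [bitLen, if_neg hn, Nat.log2_eq_log_two]

lemma log_pow_base (B M : Nat) (hB : 1 ≤ B) (hM : M ≠ 0) :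
    Nat.log (2 ^ B) M = Nat.log 2 M / B := by
  apply Nat.log_eq_of_pow_le_of_lt_pow
  · calc (2 ^ B) ^ (Nat.log 2 M / B) = 2 ^ (B * (Nat.log 2 M / B)) := by rw [← pow_mul]
    _ ≤ 2 ^ Nat.log 2 M := Nat.pow_le_pow_right (by norm_num) (by
        have := Nat.div_mul_le_self (Nat.log 2 M) B
        nlinarith)
    _ ≤ M := Nat.pow_log_le_self 2 hM
  · calc M < 2 ^ (Nat.log 2 M + 1) := Nat.lt_pow_succ_log_self (by norm_num) M
    _ ≤ 2 ^ (B * (Nat.log 2 M / B + 1)) := by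
        apply Nat.pow_le_pow_right (by norm_num)
        have h := Nat.div_add_mod (Nat.log 2 M) B
        have h2 := Nat.mod_lt (Nat.log 2 M) (by omega : 0 < B)
        nlinarith
    _ = (2 ^ B) ^ (Nat.log 2 M / B + 1) := by rw [← pow_mul]

lemma gen_lenLoop_eq (M W : Nat) (hW : 2 ≤ W) (hM : M ≠ 0) :
    ∀ (d j : Nat), Nat.log W M + 1 - j ≤ d → 1 ≤ j → W ^ (j - 1) ≤ M →
      gen_lenLoop M W (W ^ j) (j : Int) = (Nat.log W M : Int) + 1 := by
  intro d
  induction d with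
  | zero =>
    intro j hd hj hinv
    -- j ≥ log + 1, and W ^ (j-1) ≤ M gives j - 1 ≤ log, so j = log + 1 and W ^ j > M
    have h1 : j - 1 ≤ Nat.log W M := (Nat.pow_le_iff_le_log (by omega) hM).1 hinv
    have hj' : j = Nat.log W M + 1 := by omega
    have hc : ¬ W ^ j ≤ M := by
      intro hc
      have := (Nat.pow_le_iff_le_log (by omega) hM).1 hc
      omega
    rw [gen_lenLoop, dif_neg (by tauto)]
    simp [hj']
  | succ d ih =>
    intro j hd hj hinv
    by_cases hc : W ^ j ≤ M
    · have hWj : 1 ≤ W ^ j := Nat.one_le_pow _ _ (by omega)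
      rw [gen_lenLoop, dif_pos ⟨hc, hW, hWj⟩]
      have hjlog : j ≤ Nat.log W M := (Nat.pow_le_iff_le_log (by omega) hM).1 hc
      have hmul : W ^ j * W = W ^ (j + 1) := by ring
      rw [hmul]
      have := ih (j + 1) (by omega) (by omega) (by simpa using hc)
      have hcast : ((j : Int) + 1) = ((j + 1 : Nat) : Int) := by push_cast; ring
      rw [hcast, this]
    · have h1 : j - 1 ≤ Nat.log W M := (Nat.pow_le_iff_le_log (by omega) hM).1 hinv
      have h2 : Nat.log W M < j := (Nat.lt_pow_iff_log_lt (by omega) hM).1 (by omega)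
      have hj' : j = Nat.log W M + 1 := by omega
      rw [gen_lenLoop, dif_neg (by tauto)]
      simp [hj']

-- ===== VERDICT (by name: the statement is the Claim_ definition above) =====
theorem gen_len_spec : Claim_equal_gen_len := by
  intro sp b _ hPre
  unfold Pre_gen_len at hPre
  unfold Spec_gen_len gen_len gen_len_alt
  dsimp only
  set B : Nat := b.toNat with hB
  have hB1 : 1 ≤ B := by omega
  set m : Int := PySem.Int.floordiv (8 * sp + b - 1) b * (2 ^ B - 1) with hm
  have hw2 : (2 : Int) ≤ 2 ^ B := by
    calc (2 : Int) = 2 ^ 1 := by ring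
    _ ≤ 2 ^ B := by apply pow_le_pow_right₀ <;> omega
  have hWnat : ((2 : Int) ^ B).toNat = 2 ^ B := by
    rw [show ((2:Int) ^ B) = ((2 ^ B : Nat) : Int) by push_cast; ring, Int.toNat_natCast]
  by_cases hm0 : m ≤ 0
  · have hM0 : m.toNat = 0 := Int.toNat_of_nonpos hm0
    rw [gen_lenLoop, dif_neg (by rw [hM0, hWnat]; intro h; have := h.1; omega), if_pos hm0]
  · have hM : m.toNat ≠ 0 := by omega
    rw [if_neg hm0, hWnat]
    have := gen_lenLoop_eq m.toNat (2 ^ B) (by omega) hM (Nat.log (2 ^ B) m.toNat) 1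
      (by omega) (by omega) (by simpa using Nat.one_le_iff_ne_zero.2 hM)
    simp only [pow_one, Nat.cast_one] at this
    rw [this,
      log_pow_base B m.toNat hB1 hM, bitLen_eq_log2_succ m.toNat hM]
    simp
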